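-- pv_equiv track=rewrite | github.com/eder3232/seace-api-scraper | src/devtools/network_monitor.py | _is_static_asset
-- ===== SOURCE A (Python) =====
-- def _is_static_asset(url: str) -> bool:
--     static_extensions = (
--         ".css",
--         ".js",
--         ".png",
--         ".jpg",
--         ".jpeg",
--         ".gif",
--         ".svg",
--         ".ico",
--         ".woff",
--         ".woff2",
--         ".ttf",
--         ".map",
--     )
--     lowered = url.lower()
--     return any(lowered.endswith(ext) for ext in static_extensions)
-- ===== SOURCE B (Python) =====
-- _STATIC_EXTENSIONS = frozenset((
--     ".css", ".js", ".png", ".jpg", ".jpeg", ".gif",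
--     ".svg", ".ico", ".woff", ".woff2", ".ttf", ".map",
-- ))
--
--
-- def _is_static_asset(url: str) -> bool:
--     lowered = url.lower()
--     idx = lowered.rfind(".")
--     if idx == -1:
--         return False
--     return lowered[idx:] in _STATIC_EXTENSIONS
-- ===== Notes on version B (the rewrite author's own statement) =====
-- stated objective: idiomatic
-- what changed: B replaces A's any()-scan of endswith over all 12 extensions with a single rfind of the last dot to parse the trailing extension, followed by one frozenset membership test.
import Mathlib
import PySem

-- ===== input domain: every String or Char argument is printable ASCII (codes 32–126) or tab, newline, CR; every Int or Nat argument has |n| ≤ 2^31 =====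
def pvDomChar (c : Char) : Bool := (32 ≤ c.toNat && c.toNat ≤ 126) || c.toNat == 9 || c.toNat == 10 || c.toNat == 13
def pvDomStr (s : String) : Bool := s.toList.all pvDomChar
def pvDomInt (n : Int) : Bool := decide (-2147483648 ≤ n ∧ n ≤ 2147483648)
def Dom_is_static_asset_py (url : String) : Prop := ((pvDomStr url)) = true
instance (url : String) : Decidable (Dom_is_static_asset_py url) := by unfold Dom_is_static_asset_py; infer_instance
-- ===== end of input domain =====

-- B replaces A's scan of endswith over all 12 extensions by a single rfind('.')
-- parse of the trailing extension plus one set-membership test (objective: idiomatic).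

-- ===== PORT A =====
def is_static_asset_py (url : String) : Bool :=
  let static_extensions : List String :=
    [".css", ".js", ".png", ".jpg", ".jpeg", ".gif",
     ".svg", ".ico", ".woff", ".woff2", ".ttf", ".map"]
  let lowered := PySem.Str.lower url
  static_extensions.any (fun ext => PySem.Str.endswith lowered ext)

-- ===== PORT B =====
def pvStaticExtSet : PySem.Set String :=
  PySem.Set.ofList
    [".css", ".js", ".png", ".jpg", ".jpeg", ".gif",
     ".svg", ".ico", ".woff", ".woff2", ".ttf", ".map"]

def is_static_asset_py_alt (url : String) : Bool :=
  let lowered := PySem.Str.lower url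
  let idx := PySem.Str.rfind lowered "."
  if idx = -1 then false
  else PySem.Set.contains pvStaticExtSet (PySem.Str.slice lowered (some idx) none)

-- ===== PRECONDITION & SPEC =====
def Spec_is_static_asset_py (url : String) (out : Bool) : Prop := out = is_static_asset_py_alt url
instance (url : String) (out : Bool) : Decidable (Spec_is_static_asset_py url out) := by unfold Spec_is_static_asset_py; infer_instance

-- ===== CLAIM (what is proved, stated in full; the proofs are below) =====
def Claim_equal_is_static_asset_py : Prop := ∀ (url : String), Dom_is_static_asset_py url → Spec_is_static_asset_py url (is_static_asset_py url)

-- ===== LEMMAS AND PROOFS =====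

-- rfind.go l ['.'] n either finds no dot at positions ≤ n, or returns the greatest
-- position k ≤ n where a dot occurs.
theorem pv_go_spec (l : List Char) (n : ℕ) :
    (PySem.Chars.rfind.go l ['.'] n = -1 ∧ ∀ i ≤ n, ¬ (['.'] <+: l.drop i)) ∨
    (∃ k : ℕ, k ≤ n ∧ PySem.Chars.rfind.go l ['.'] n = (k : Int) ∧
      (['.'] <+: l.drop k) ∧
      ∀ j : ℕ, k < j → j ≤ n → ¬ (['.'] <+: l.drop j)) := by
  induction n with
  | zero =>
    by_cases h : ['.'] <+: l
    · right
      exact ⟨0, le_refl _, by simp [PySem.Chars.rfind.go, h], by simpa using h, by omega⟩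
    · left
      refine ⟨by simp [PySem.Chars.rfind.go, h], ?_⟩
      intro i hi
      interval_cases i
      simpa using h
  | succ m ih =>
    by_cases h : ['.'] <+: l.drop (m + 1)
    · right
      refine ⟨m + 1, le_refl _, by simp [PySem.Chars.rfind.go, h], h, ?_⟩
      intro j h1 h2
      omega
    · rcases ih with ⟨hgo, hnone⟩ | ⟨k, hk, hgo, hpre, hmax⟩
      · left
        refine ⟨by simp [PySem.Chars.rfind.go, h, hgo], ?_⟩
        intro i hi
        rcases Nat.lt_or_ge i (m + 1) with hlt | hge
        · exact hnone i (by omega)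
        · have : i = m + 1 := by omega
          simpa [this] using h
      · right
        refine ⟨k, by omega, by simp [PySem.Chars.rfind.go, h, hgo], hpre, ?_⟩
        intro j h1 h2
        rcases Nat.lt_or_ge j (m + 1) with hlt | hge
        · exact hmax j h1 (by omega)
        · have : j = m + 1 := by omega
          simpa [this] using h

-- ['.'] is a prefix of xs iff xs starts with '.'.
theorem pv_dotPrefix_iff (xs : List Char) :
    (['.'] <+: xs) ↔ ∃ t, xs = '.' :: t := by
  constructor
  · rintro ⟨t, rfl⟩; exact ⟨t, rfl⟩
  · rintro ⟨t, rfl⟩; exact ⟨t, rfl⟩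

-- two dot-headed suffixes of the same list with dot-free tails coincide
theorem pv_dot_suffix_unique (t t' : List Char) (_h : '.' ∉ t) (h' : '.' ∉ t')
    (hs : ('.' :: t) <:+ ('.' :: t')) : ('.' :: t) = ('.' :: t') := by
  rcases List.suffix_cons_iff.mp hs with heq | hsub
  · exact heq
  · exact absurd (hsub.subset (by simp)) h'

-- each extension is '.' followed by a dot-free tail
theorem pv_ext_shape :
    ∀ e ∈ [".css", ".js", ".png", ".jpg", ".jpeg", ".gif",
           ".svg", ".ico", ".woff", ".woff2", ".ttf", ".map"],
      (e : String).toList.head? = some '.' ∧ '.' ∉ (e : String).toList.tail := by decide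

theorem pv_main (url : String) : is_static_asset_py url = is_static_asset_py_alt url := by
  unfold is_static_asset_py is_static_asset_py_alt pvStaticExtSet
  simp only []
  set L := PySem.Str.lower url with hL
  set exts : List String :=
    [".css", ".js", ".png", ".jpg", ".jpeg", ".gif",
     ".svg", ".ico", ".woff", ".woff2", ".ttf", ".map"] with hexts
  set l : List Char := L.toList with hl
  have hrfind : PySem.Str.rfind L "." = PySem.Chars.rfind.go l ['.'] l.length := by
    rw [PySem.Str.rfind_eq]; rfl
  rcases pv_go_spec l l.length with ⟨hgo, hnone⟩ | ⟨k, hk, hgo, hpre, hmax⟩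
  · -- no dot anywhere: both sides false
    have hidx : PySem.Str.rfind L "." = -1 := by rw [hrfind, hgo]
    rw [hidx, if_pos rfl]
    -- A is false: every extension contains '.', but l has none
    have hnd : '.' ∉ l := by
      intro hmem
      obtain ⟨i, hi, hgi⟩ := List.getElem_of_mem hmem
      have hp : ['.'] <+: l.drop i := by
        rw [List.drop_eq_getElem_cons hi, hgi]
        exact ⟨l.drop (i + 1), rfl⟩
      exact hnone i (by omega) hp
    rw [List.any_eq_false]
    intro e he
    rw [PySem.Str.endswith_eq]
    intro hc
    have hsuf : e.toList <:+ l := (PySem.Chars.endswith_iff _ _).mp hc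
    obtain ⟨hhead, _⟩ := pv_ext_shape e he
    have hde : '.' ∈ e.toList := by
      cases htl : e.toList with
      | nil => simp [htl] at hhead
      | cons a t => rw [htl] at hhead; simp at hhead; simp [hhead]
    exact hnd (hsuf.subset hde)
  · -- dot found at greatest position k
    have hidx : PySem.Str.rfind L "." = (k : Int) := by rw [hrfind, hgo]
    rw [hidx, if_neg (by omega : ¬((k : Int) = -1))]
    -- the slice is l.drop k as a char list
    have hslice : (PySem.Str.slice L (some (k : Int)) none).toList = l.drop k := by
      rw [PySem.Str.toList_slice, PySem.Chars.slice_eq_listSlice,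
        PySem.List.slice_from_natCast]
    obtain ⟨t, hdrop⟩ := (pv_dotPrefix_iff _).mp hpre
    have htail : l.drop (k + 1) = t := by
      rw [← List.tail_drop, hdrop]; rfl
    have hnt : '.' ∉ t := by
      intro hmem
      obtain ⟨m, hm, hgm⟩ := List.getElem_of_mem hmem
      have hlt : k + 1 + m < l.length := by
        have hlen : (List.drop (k + 1) l).length = l.length - (k + 1) :=
          List.length_drop
        rw [htail] at hlen
        omega
      have hp : ['.'] <+: l.drop (k + 1 + m) := by
        have hgl : l[k + 1 + m]'hlt = '.' := by
          have hgd := List.getElem_drop (xs := l) (i := k + 1) (j := m)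
            (h := by rw [htail]; exact hm)
          rw [← hgd, List.getElem_of_eq htail]
          exact hgm
        rw [List.drop_eq_getElem_cons hlt, hgl]
        exact ⟨l.drop (k + 1 + m + 1), rfl⟩
      exact hmax (k + 1 + m) (by omega) (by omega) hp
    -- both sides reduced to membership of l.drop k among the extensions
    rw [Bool.eq_iff_iff]
    simp only [List.any_eq_true, PySem.Str.endswith_eq, PySem.Chars.endswith_iff,
      PySem.Set.contains, List.contains_eq_mem, decide_eq_true_eq,
      PySem.Set.mem_ofList]
    constructor
    · rintro ⟨e, he, hsuf⟩
      obtain ⟨hhead, htl⟩ := pv_ext_shape e he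
      obtain ⟨te, hte⟩ : ∃ te, e.toList = '.' :: te := by
        cases hx : e.toList with
        | nil => simp [hx] at hhead
        | cons a t' => rw [hx] at hhead; simp at hhead; exact ⟨t', by rw [hhead]⟩
      have hnte : '.' ∉ te := by rw [hte] at htl; simpa using htl
      have hdsuf : ('.' :: t) <:+ l := by rw [← hdrop]; exact List.drop_suffix k l
      have heq : e.toList = l.drop k := by
        rw [hte, hdrop]
        rcases List.suffix_or_suffix_of_suffix (hte ▸ hsuf) hdsuf with h1 | h2
        · exact pv_dot_suffix_unique te t hnte hnt h1
        · exact (pv_dot_suffix_unique t te hnt hnte h2).symm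
      have hstr : PySem.Str.slice L (some (k : Int)) none = e :=
        String.toList_inj.mp (by rw [hslice, heq])
      rw [hstr]; exact he
    · intro hmem
      refine ⟨_, hmem, ?_⟩
      rw [hslice]
      exact List.drop_suffix k l

-- ===== VERDICT (by name: the statement is the Claim_ definition above) =====
theorem is_static_asset_py_spec : Claim_equal_is_static_asset_py := by
  intro url _
  unfold Spec_is_static_asset_py
  exact pv_main url
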